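-- pv_equiv track=rewrite | github.com/WoosungMichael/Algorithm | CodingTest/Kakao/1.py | solution
-- ===== SOURCE A (Python) =====
-- def solution(stockPrices, k):
--     # Write your code here
--     cnt = 0
--     tmp = 0
--     tmp_num = stockPrices[0]
--     if k == 1:
--         return len(stockPrices)
--     for i in stockPrices:
--         if tmp_num < i:
--             tmp += 1
--         else:
--             if tmp >= k - 1:
--                 cnt += tmp - k + 2
--             tmp = 0
--         tmp_num = i
--     if tmp >= k - 1:
--         cnt += tmp - k + 2
--     return cnt
-- ===== SOURCE B (Python) =====
-- def solution(stockPrices, k):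
--     n = len(stockPrices)
--     drops = [i for i, (a, b) in enumerate(zip(stockPrices, stockPrices[1:]), 1) if a >= b]
--     breaks = [0] + drops + [n]
--     return sum(max(0, b - a - k + 1) for a, b in zip(breaks, breaks[1:]))
-- ===== Notes on version B (the rewrite author's own statement) =====
-- stated objective: alternative
-- what changed: B is a staged pipeline with no carried run state: it materializes the list of run-boundary indices via a comprehension over adjacent pairs, then sums the closed form max(0, segment_length - k + 1) over consecutive boundaries, replacing A's single fused pass (run counter, per-boundary batch add, final flush, k==1 early return).
-- outside the precondition, e.g. on solution([], 1): A raises IndexError, B returns 0; on solution([1], 0): A returns 4, B returns 2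
import Mathlib
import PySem

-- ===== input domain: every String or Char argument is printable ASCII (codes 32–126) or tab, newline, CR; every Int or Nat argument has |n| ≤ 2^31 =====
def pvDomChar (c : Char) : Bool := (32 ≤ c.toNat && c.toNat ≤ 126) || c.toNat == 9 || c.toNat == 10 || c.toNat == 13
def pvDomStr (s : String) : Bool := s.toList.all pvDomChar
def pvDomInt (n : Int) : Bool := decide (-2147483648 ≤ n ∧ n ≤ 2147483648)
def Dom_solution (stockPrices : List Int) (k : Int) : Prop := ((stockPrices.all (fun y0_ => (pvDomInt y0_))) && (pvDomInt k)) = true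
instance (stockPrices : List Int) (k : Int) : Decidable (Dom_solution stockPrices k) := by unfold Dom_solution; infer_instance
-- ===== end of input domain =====

-- B is a staged pipeline: materialize the list of run-boundary indices (a comprehension over
-- adjacent pairs), then sum the closed form max(0, segment - k + 1) over consecutive boundaries —
-- replacing A's single fused pass with carried run state and its k==1 early return (same O(n) cost).


-- ===== PORT A =====
-- A's loop body: state (cnt, tmp, tmp_num)
def solutionAStep (k : Int) (st : Int × Int × Int) (i : Int) : Int × Int × Int :=
  if st.2.2 < i then (st.1, st.2.1 + 1, i)
  else ((if st.2.1 ≥ k - 1 then st.1 + st.2.1 - k + 2 else st.1), 0, i)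

def solution (stockPrices : List Int) (k : Int) : Int :=
  match stockPrices with
  | [] => 0  -- Python raises IndexError at stockPrices[0]; excluded by Pre_solution
  | t0 :: _ =>
    if k = 1 then (stockPrices.length : Int)
    else
      let s := stockPrices.foldl (solutionAStep k) (0, 0, t0)
      if s.2.1 ≥ k - 1 then s.1 + s.2.1 - k + 2 else s.1

-- ===== PORT B =====
-- drops = [i for i, (a, b) in enumerate(zip(sp, sp[1:]), 1) if a >= b]
-- breaks = [0] + drops + [n]; return sum(max(0, b - a - k + 1) for a, b in zip(breaks, breaks[1:]))
def solution_alt (stockPrices : List Int) (k : Int) : Int :=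
  let n : Int := stockPrices.length
  let drops : List Int :=
    (PySem.List.enumerate (stockPrices.zip (stockPrices.drop 1)) 1).filterMap
      (fun p => if p.2.1 ≥ p.2.2 then some p.1 else none)
  let breaks : List Int := [0] ++ drops ++ [n]
  ((breaks.zip (breaks.drop 1)).map (fun ab => max 0 (ab.2 - ab.1 - k + 1))).sum

-- ===== PRECONDITION & SPEC =====
-- Pre_ excludes the empty list, on which A raises IndexError, and non-positive k, which lies
-- outside the function's purpose (a window length must be ≥ 1): for k ≤ 0 no count is specified
-- and A's and B's ad-hoc totals are both defensible and differ (see the cited examples).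
def Pre_solution (stockPrices : List Int) (k : Int) : Prop := stockPrices ≠ [] ∧ 1 ≤ k
instance (stockPrices : List Int) (k : Int) : Decidable (Pre_solution stockPrices k) := by unfold Pre_solution; infer_instance
def pvWitness_solution : List Int × Int := ([1, 2, 3, 2], 2)

def Spec_solution (stockPrices : List Int) (k : Int) (out : Int) : Prop := out = solution_alt stockPrices k
instance (stockPrices : List Int) (k : Int) (out : Int) : Decidable (Spec_solution stockPrices k out) := by unfold Spec_solution; infer_instance

-- ===== CLAIM (what is proved, stated in full; the proofs are below) =====
def Claim_equal_solution : Prop := ∀ (stockPrices : List Int) (k : Int), Dom_solution stockPrices k → Pre_solution stockPrices k → Spec_solution stockPrices k (solution stockPrices k)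

-- ===== LEMMAS AND PROOFS =====

-- Proof-side characterisations: brk = B's drop indices, runsL = the maximal increasing run lengths,
-- adj = B's sum over consecutive break pairs.
def brk (s prev : Int) : List Int → List Int
  | [] => []
  | x :: xs => if prev ≥ x then s :: brk (s + 1) x xs else brk (s + 1) x xs

def runsL (r prev : Int) : List Int → List Int
  | [] => [r]
  | x :: xs => if prev < x then runsL (r + 1) x xs else r :: runsL 1 x xs

def adj (k : Int) : List Int → Int
  | a :: b :: t => max 0 (b - a - k + 1) + adj k (b :: t)
  | _ => 0

lemma adj_eq (k : Int) : ∀ (bs : List Int),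
    ((bs.zip (bs.drop 1)).map (fun ab => max 0 (ab.2 - ab.1 - k + 1))).sum = adj k bs := by
  intro bs
  match bs with
  | [] => simp [adj]
  | [a] => simp [adj]
  | a :: b :: t =>
    simp only [List.drop_succ_cons, List.drop_zero, List.zip_cons_cons, List.map_cons,
      List.sum_cons, adj]
    rw [← adj_eq k (b :: t)]
    simp

lemma drops_eq : ∀ (xs : List Int) (prev s : Int),
    ((PySem.List.enumerate ((prev :: xs).zip xs) s).filterMap
      (fun p => if p.2.1 ≥ p.2.2 then some p.1 else none)) = brk s prev xs := by
  intro xs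
  induction xs with
  | nil => intro prev s; simp [brk]
  | cons x xs ih =>
    intro prev s
    simp only [List.zip_cons_cons, PySem.List.enumerate_cons, List.filterMap_cons, brk]
    by_cases h : prev ≥ x
    · simp [h, ih x (s + 1)]
    · simp [h, ih x (s + 1)]

lemma adj_brk (k : Int) : ∀ (xs : List Int) (prev a r s e : Int), s = a + r → e = s + xs.length →
    adj k (a :: (brk s prev xs ++ [e]))
      = ((runsL r prev xs).map (fun L => max 0 (L - k + 1))).sum := by
  intro xs
  induction xs with
  | nil =>
    intro prev a r s e hs he
    simp only [brk, List.nil_append, adj, runsL, List.map_cons, List.map_nil, List.sum_cons,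
      List.sum_nil, List.length_nil] at *
    omega
  | cons x xs ih =>
    intro prev a r s e hs he
    simp only [brk, runsL, List.length_cons] at *
    by_cases h : prev ≥ x
    · rw [if_pos h, if_neg (by omega : ¬ prev < x)]
      simp only [List.cons_append, adj]
      rw [ih x s 1 (s + 1) e (by omega) (by push_cast at he ⊢; omega)]
      simp only [List.map_cons, List.sum_cons]
      omega
    · rw [if_neg h, if_pos (by omega : prev < x)]
      exact ih x a (r + 1) (s + 1) e (by omega) (by push_cast at he ⊢; omega)

lemma alt_eq_runs (k : Int) (t0 : Int) (rest : List Int) :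
    solution_alt (t0 :: rest) k
      = ((runsL 1 t0 rest).map (fun L => max 0 (L - k + 1))).sum := by
  unfold solution_alt
  simp only [List.drop_succ_cons, List.drop_zero]
  rw [adj_eq, drops_eq]
  rw [List.singleton_append, List.cons_append]
  rw [adj_brk k rest t0 0 1 1 ((t0 :: rest).length : Int) (by norm_num) (by push_cast [List.length_cons]; omega)]

-- A's final flush, as a named function (definitionally the 'if' in the port).
def flushA (k : Int) (s : Int × Int × Int) : Int :=
  if s.2.1 ≥ k - 1 then s.1 + s.2.1 - k + 2 else s.1

-- A's fold with final flush equals the closed-form sum over run lengths.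
lemma a_fold_eq_runs (k : Int) : ∀ (xs : List Int) (cnt tmp prev : Int),
    flushA k (xs.foldl (solutionAStep k) (cnt, tmp, prev))
      = cnt + ((runsL (tmp + 1) prev xs).map (fun L => max 0 (L - k + 1))).sum := by
  intro xs
  induction xs with
  | nil =>
    intro cnt tmp prev
    simp only [List.foldl_nil, flushA, runsL, List.map_cons, List.map_nil, List.sum_cons,
      List.sum_nil]
    split_ifs <;> omega
  | cons x xs ih =>
    intro cnt tmp prev
    simp only [List.foldl_cons, solutionAStep, runsL]
    by_cases h : prev < x
    · rw [if_pos h, if_pos h]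
      have := ih cnt (tmp + 1) x
      simpa using this
    · rw [if_neg h, if_neg h]
      rw [ih (if tmp ≥ k - 1 then cnt + tmp - k + 2 else cnt) 0 x]
      simp only [zero_add, List.map_cons, List.sum_cons]
      split_ifs <;> omega

-- With k = 1 every run contributes its full length: the sum is the list length.
lemma runs_sum_k_one : ∀ (xs : List Int) (r prev : Int), 1 ≤ r →
    ((runsL r prev xs).map (fun L => max 0 (L - 1 + 1))).sum = r + xs.length := by
  intro xs
  induction xs with
  | nil => intro r prev hr; simp [runsL]; omega
  | cons x xs ih =>
    intro r prev hr
    simp only [runsL, List.length_cons]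
    by_cases h : prev < x
    · rw [if_pos h, ih (r + 1) x (by omega)]; push_cast; ring
    · rw [if_neg h]
      simp only [List.map_cons, List.sum_cons, ih 1 x (by omega)]
      push_cast; omega

-- ===== VERDICT (by name: the statements are the Claim_ definitions above) =====
theorem solution_spec : Claim_equal_solution := by
  intro stockPrices k _ hpre
  obtain ⟨hne, hk⟩ := hpre
  unfold Spec_solution
  cases stockPrices with
  | nil => exact absurd rfl hne
  | cons t0 rest =>
    rw [alt_eq_runs]
    by_cases hk1 : k = 1
    · subst hk1
      rw [runs_sum_k_one rest 1 t0 (le_refl 1)]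
      simp [solution, add_comm]
    · have hk2 : 2 ≤ k := by omega
      -- A's first iteration (over t0 itself) leaves the state (0, 0, t0) unchanged
      have hfirst : solutionAStep k (0, 0, t0) t0 = (0, 0, t0) := by
        simp only [solutionAStep]
        split_ifs <;> first | rfl | omega
      have hmain := a_fold_eq_runs k rest 0 0 t0
      simp only [flushA] at hmain
      simp only [solution, if_neg hk1, List.foldl_cons, hfirst]
      simpa using hmain
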